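-- pv_equiv track=rewrite | github.com/bioinf/bi2014-neurospora-crassa | genestructure.py | getexons
-- ===== SOURCE A (Python) =====
-- from collections import namedtuple, defaultdict
--
-- Exon = namedtuple('Exon', ['query_start','query_end', 'hit_start', 'hit_end'])
--
-- def getexons(aln, start_hit, start_query):
--     i, j = start_hit, start_query
--
--     isexon = False
--     exons = []
--
--     for a, b in zip(*aln):
--         if not isexon and a != '-':
--             start_hit, start_query = i, j
--             isexon = True
--         elif isexon and a == '-':
--             exons.append(Exon(start_query, j, start_hit, i))
--             isexon = False
--         if b != '-':
--             i += 3
--         if a != '-':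
--             j += 1
--         if b == '*':
--             break
--     if isexon:
--         exons.append(Exon(start_query, j, start_hit, i))
--     return exons
-- ===== SOURCE B (Python) =====
-- from itertools import groupby
--
-- def getexons(aln, start_hit, start_query):
--     cols = list(zip(*aln))
--     # active region: everything up to and including the first stop codon in the hit track
--     stop = next((k for k, (a, b) in enumerate(cols) if b == '*'), len(cols) - 1)
--     cols = cols[:stop + 1]
--     i, j = start_hit, start_query
--     exons = []
--     for isrun, grp in groupby(cols, key=lambda c: c[0] != '-'):
--         grp = list(grp)
--         di = 3 * sum(b != '-' for a, b in grp)
--         if isrun: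
--             exons.append((j, j + len(grp), i, i + di))
--             j += len(grp)
--         i += di
--     return exons
-- ===== Notes on version B (the rewrite author's own statement) =====
-- stated objective: alternative
-- what changed: Replaces A's single interleaved loop with a flag and pre/post-increment bookkeeping by a two-phase decomposition: first truncate the column list at the first '*' in the hit track, then iterate itertools.groupby runs of non-gap query columns, emitting one exon per run from run length and a count of non-gap hit columns.
import Mathlib
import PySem

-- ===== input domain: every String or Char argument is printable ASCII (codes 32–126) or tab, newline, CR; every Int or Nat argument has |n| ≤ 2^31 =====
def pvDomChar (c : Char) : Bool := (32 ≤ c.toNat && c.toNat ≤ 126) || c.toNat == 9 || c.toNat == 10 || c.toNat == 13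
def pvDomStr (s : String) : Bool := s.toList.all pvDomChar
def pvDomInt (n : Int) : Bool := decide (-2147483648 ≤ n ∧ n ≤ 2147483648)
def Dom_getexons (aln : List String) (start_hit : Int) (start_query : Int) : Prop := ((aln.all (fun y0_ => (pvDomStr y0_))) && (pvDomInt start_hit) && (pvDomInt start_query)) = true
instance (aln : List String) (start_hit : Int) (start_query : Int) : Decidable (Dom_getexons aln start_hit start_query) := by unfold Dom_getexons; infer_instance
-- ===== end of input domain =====

-- B replaces A's single flag-driven loop by a two-phase decomposition (truncate at the first '*' in
-- the hit track, then a groupby over maximal runs of non-gap query columns); same O(n) cost (objective: alternative).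

-- ===== PORT A =====
-- zip(*aln): the loop unpacks pairs, so it only runs with exactly two rows (or an empty zip)
def pvColsA (aln : List String) : List (Char × Char) :=
  match aln with
  | [s1, s2] => s1.toList.zip s2.toList
  | _ => []

def pvLoopA : List (Char × Char) → Int → Int → Int → Int → Bool → List (Int × Int × Int × Int) → List (Int × Int × Int × Int)
  | [], i, j, sh, sq, isexon, exons =>
      if isexon then exons ++ [(sq, j, sh, i)] else exons
  | (a, b) :: rest, i, j, sh, sq, isexon, exons =>
      let st :=
        if !isexon && a != '-' then (i, j, true, exons)
        else if isexon && a == '-' then (sh, sq, false, exons ++ [(sq, j, sh, i)])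
        else (sh, sq, isexon, exons)
      match st with
      | (sh, sq, isexon, exons) =>
        let i := if b != '-' then i + 3 else i
        let j := if a != '-' then j + 1 else j
        if b == '*' then (if isexon then exons ++ [(sq, j, sh, i)] else exons)
        else pvLoopA rest i j sh sq isexon exons

def getexons (aln : List String) (start_hit : Int) (start_query : Int) : List (Int × Int × Int × Int) :=
  pvLoopA (pvColsA aln) start_hit start_query start_hit start_query false []

-- ===== PORT B =====
-- groupby(cols, key = a != '-') as (key, group) pairs
def pvRunsB : List (Char × Char) → List (Bool × List (Char × Char))
  | [] => []
  | c :: rest =>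
      (c.1 != '-', c :: rest.takeWhile (fun x => (x.1 != '-') == (c.1 != '-'))) ::
        pvRunsB (rest.dropWhile (fun x => (x.1 != '-') == (c.1 != '-')))
  termination_by cols => cols.length
  decreasing_by simpa using Nat.lt_succ_of_le (List.length_dropWhile_le _ _)

-- the for-loop over groups: a run emits one exon and advances both coordinates
def pvGoB : List (Bool × List (Char × Char)) → Int → Int → List (Int × Int × Int × Int) → List (Int × Int × Int × Int)
  | [], _, _, exons => exons
  | (isrun, g) :: gs, i, j, exons =>
      let di : Int := 3 * (g.countP (fun c => c.2 != '-') : Int)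
      if isrun then pvGoB gs (i + di) (j + (g.length : Int)) (exons ++ [(j, j + (g.length : Int), i, i + di)])
      else pvGoB gs (i + di) j exons

def getexons_alt (aln : List String) (start_hit : Int) (start_query : Int) : List (Int × Int × Int × Int) :=
  let cols := pvColsA aln
  let n : Nat :=
    match cols.findIdx? (fun c => c.2 == '*') with
    | some k => k + 1
    | none => cols.length
  pvGoB (pvRunsB (cols.take n)) start_hit start_query []

-- ===== PRECONDITION & SPEC =====
-- Pre_ excludes exactly the inputs where Python A raises ValueError: zip(*aln) yields a nonempty
-- stream of tuples of arity ≠ 2 (aln not of length 2, nonempty, with no empty string), so the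
-- 'for a, b in' unpacking fails.
def Pre_getexons (aln : List String) (start_hit : Int) (start_query : Int) : Prop :=
  aln.length = 2 ∨ aln = [] ∨ ∃ s ∈ aln, s = ""
instance (aln : List String) (start_hit : Int) (start_query : Int) : Decidable (Pre_getexons aln start_hit start_query) := by unfold Pre_getexons; infer_instance

def pvWitness_getexons : List String × Int × Int := (["AC-G", "AAA*"], 10, 5)

def Spec_getexons (aln : List String) (start_hit : Int) (start_query : Int) (out : List (Int × Int × Int × Int)) : Prop := out = getexons_alt aln start_hit start_query
instance (aln : List String) (start_hit : Int) (start_query : Int) (out : List (Int × Int × Int × Int)) : Decidable (Spec_getexons aln start_hit start_query out) := by unfold Spec_getexons; infer_instance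

-- ===== CLAIM (what is proved, stated in full; the proofs are below) =====
def Claim_equal_getexons : Prop := ∀ (aln : List String) (start_hit : Int) (start_query : Int), Dom_getexons aln start_hit start_query → Pre_getexons aln start_hit start_query → Spec_getexons aln start_hit start_query (getexons aln start_hit start_query)

-- ===== LEMMAS AND PROOFS =====

-- pvLoopA with the '*'-break removed (runs on the already-truncated column list)
def pvLoopNB : List (Char × Char) → Int → Int → Int → Int → Bool → List (Int × Int × Int × Int) → List (Int × Int × Int × Int)
  | [], i, j, sh, sq, isexon, exons =>
      if isexon then exons ++ [(sq, j, sh, i)] else exons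
  | (a, b) :: rest, i, j, sh, sq, isexon, exons =>
      let st :=
        if !isexon && a != '-' then (i, j, true, exons)
        else if isexon && a == '-' then (sh, sq, false, exons ++ [(sq, j, sh, i)])
        else (sh, sq, isexon, exons)
      match st with
      | (sh, sq, isexon, exons) =>
        let i := if b != '-' then i + 3 else i
        let j := if a != '-' then j + 1 else j
        pvLoopNB rest i j sh sq isexon exons

def pvCut (cols : List (Char × Char)) : List (Char × Char) :=
  cols.take (match cols.findIdx? (fun c => c.2 == '*') with
             | some k => k + 1
             | none => cols.length)

-- state of pvGoB when an exon is open with start coordinates (sh, sq)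
def pvGoOpen (cols : List (Char × Char)) (i j sh sq : Int) (exons : List (Int × Int × Int × Int)) : List (Int × Int × Int × Int) :=
  let r := cols.takeWhile (fun x => x.1 != '-')
  let dr : Int := 3 * (r.countP (fun c => c.2 != '-') : Int)
  pvGoB (pvRunsB (cols.dropWhile (fun x => x.1 != '-')))
    (i + dr) (j + (r.length : Int)) (exons ++ [(sq, j + (r.length : Int), sh, i + dr)])

theorem pvLoopA_cut (cols : List (Char × Char)) : ∀ i j sh sq isexon exons,
    pvLoopA cols i j sh sq isexon exons = pvLoopNB (pvCut cols) i j sh sq isexon exons := by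
  induction cols with
  | nil => intros; simp [pvLoopA, pvCut, pvLoopNB]
  | cons c rest ih =>
    intro i j sh sq isexon exons
    obtain ⟨a, b⟩ := c
    by_cases hb : (b == '*') = true
    · simp [pvLoopA, pvCut, List.findIdx?_cons, hb, List.take_succ_cons, pvLoopNB]
    · simp only [pvLoopA, pvCut, List.findIdx?_cons, hb, Bool.false_eq_true, if_false, pvLoopNB]
      cases h : (rest.findIdx? (fun c => c.2 == '*')) with
      | none => simp [h, List.take_succ_cons, pvLoopNB, ih, pvCut]
      | some k => simp [h, List.take_succ_cons, pvLoopNB, ih, pvCut]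

theorem pvGap_step (a b : Char) (rest : List (Char × Char)) (i j : Int) (exons : List (Int × Int × Int × Int))
    (ha : (a != '-') = false) :
    pvGoB (pvRunsB ((a, b) :: rest)) i j exons
      = pvGoB (pvRunsB rest) (i + (if b != '-' then 3 else 0)) j exons := by
  cases rest with
  | nil => simp [pvRunsB, pvGoB, ha]
  | cons c rs =>
    by_cases hc : (c.1 != '-') = true
    · simp [pvRunsB, pvGoB, ha, hc, List.takeWhile_cons, List.dropWhile_cons] <;> (try split_ifs) <;> (try ring_nf)
    · simp only [Bool.not_eq_true] at hc
      simp [pvRunsB, ha, hc, pvGoB, List.takeWhile_cons, List.dropWhile_cons, List.countP_cons] <;> (try split_ifs) <;> (try ring_nf)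

theorem pvOpen_step (a b : Char) (rest : List (Char × Char)) (i j sh sq : Int) (exons : List (Int × Int × Int × Int))
    (ha : (a != '-') = true) :
    pvGoB (pvRunsB ((a, b) :: rest)) i j exons
      = pvGoOpen rest (i + (if b != '-' then 3 else 0)) (j + 1) i j exons := by
  simp only [pvRunsB, ha, pvGoOpen, pvGoB, List.countP_cons]
  simp [ha] <;> (try split_ifs) <;> (try ring_nf)

theorem pvMain (cols : List (Char × Char)) :
    (∀ i j sh sq exons, pvLoopNB cols i j sh sq false exons = pvGoB (pvRunsB cols) i j exons)
    ∧ (∀ i j sh sq exons, pvLoopNB cols i j sh sq true exons = pvGoOpen cols i j sh sq exons) := by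
  induction cols with
  | nil =>
    constructor <;> intro i j sh sq exons <;> simp [pvLoopNB, pvRunsB, pvGoB, pvGoOpen]
  | cons c rest ih =>
    obtain ⟨a, b⟩ := c
    constructor <;> intro i j sh sq exons
    · by_cases ha : (a != '-') = true
      · rw [pvOpen_step a b rest i j i j exons ha]
        simp [pvLoopNB, ha, ih.2] <;> (try split_ifs) <;> (try ring_nf)
      · rw [pvGap_step a b rest i j exons (by simpa using ha)]
        simp [pvLoopNB, ha, ih.1] <;> (try split_ifs) <;> (try ring_nf)
    · by_cases ha : (a != '-') = true
      · have hne : ¬ (a = '-') := by simpa using ha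
        simp [pvLoopNB, ha, hne, ih.2, pvGoOpen, List.takeWhile_cons, List.dropWhile_cons,
          List.countP_cons] <;> (try split_ifs) <;> (try ring_nf)
      · have heq : a = '-' := by simpa using ha
        simp only [pvLoopNB, heq, Bool.not_true, Bool.false_and, Bool.true_and, bne_self_eq_false,
          Bool.false_eq_true, if_false, beq_self_eq_true, if_true, Bool.and_true]
        have hro : pvGoOpen (('-', b) :: rest) i j sh sq exons
            = pvGoB (pvRunsB (('-', b) :: rest)) i j (exons ++ [(sq, j, sh, i)]) := by
          simp [pvGoOpen, List.takeWhile_cons, List.dropWhile_cons]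
        rw [hro, pvGap_step '-' b rest i j _ (by simp)]
        simp [ih.1] <;> (try split_ifs) <;> (try ring_nf)

-- ===== VERDICT (by name: the statement is the Claim_ definition above) =====
theorem getexons_spec : Claim_equal_getexons := by
  intro aln start_hit start_query _ _
  unfold Spec_getexons getexons getexons_alt
  rw [pvLoopA_cut]
  show pvLoopNB (pvCut (pvColsA aln)) _ _ _ _ false [] = _
  rw [(pvMain (pvCut (pvColsA aln))).1 start_hit start_query start_hit start_query []]
  rfl
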